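-- pv_equiv track=rewrite | github.com/Student-Lyf/RamLife | firebase/firestore-py/lib/utils/txtschedule_reader.py | has_free
-- ===== SOURCE A (Python) =====
-- def has_free(room, period, add_free = False, num_frees = 0):
--   if " " in room:
--     num_frees += 1
--     room, add_free, num_frees = has_free(room[:-(1+len(period))], period, add_free=True, num_frees=num_frees)
--     return room, add_free, num_frees
--   else:
--
--     try:
--       int(room[1])
--       if len(room) > 4:
--         room = room[:4]
--         add_free = True
--         num_frees += 1
--     except:
--       ...
--     return room, add_free, num_frees
-- ===== SOURCE B (Python) =====
-- def has_free(room, period, add_free=False, num_frees=0):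
--     step = 1 + len(period)
--     while " " in room:
--         num_frees += 1
--         add_free = True
--         room = room[:-step]
--     if len(room) > 4 and room[1].isdigit():
--         room = room[:4]
--         add_free = True
--         num_frees += 1
--     return room, add_free, num_frees
-- ===== Notes on version B (the rewrite author's own statement) =====
-- stated objective: idiomatic
-- what changed: Replaces A's tail recursion by an iterative while-loop that strips the room suffix, and replaces the try/except int(room[1]) probe by a guarded len/isdigit boolean test.
import Mathlib
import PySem

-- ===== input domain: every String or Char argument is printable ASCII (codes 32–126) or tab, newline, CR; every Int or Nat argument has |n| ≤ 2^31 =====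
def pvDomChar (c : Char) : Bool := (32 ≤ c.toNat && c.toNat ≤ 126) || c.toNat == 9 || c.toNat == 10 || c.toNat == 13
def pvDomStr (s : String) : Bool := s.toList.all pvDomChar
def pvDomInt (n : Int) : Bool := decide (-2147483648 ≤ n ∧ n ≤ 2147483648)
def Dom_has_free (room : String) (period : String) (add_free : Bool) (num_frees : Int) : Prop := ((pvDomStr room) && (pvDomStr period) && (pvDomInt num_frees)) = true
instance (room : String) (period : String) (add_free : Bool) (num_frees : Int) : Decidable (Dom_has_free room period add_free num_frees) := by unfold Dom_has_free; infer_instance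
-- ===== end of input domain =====

-- B replaces A's tail recursion by an iterative strip loop and the try/except int() probe by a
-- guarded isdigit test (objective: idiomatic; same cost).

-- ===== PORT A =====
-- shared termination fact: stripping room[:-(1+p)] shortens a nonempty room
theorem pvSliceLen_lt {α : Type} (xs : List α) (p : Nat) (h : xs ≠ []) :
    (PySem.List.slice xs none (some (-(1 + (p : Int))))).length < xs.length := by
  have hx : 0 < xs.length := List.length_pos_iff.mpr h
  simp [PySem.List.slice, PySem.List.clampIdx]
  split_ifs <;> omega

-- recursion of A on the character list (room, period as lists; String wrapper below)
def has_free_go (room : List Char) (period : List Char) (add_free : Bool) (num_frees : Int) :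
    List Char × Bool × Int :=
  if h : PySem.Chars.isIn [' '] room then
    -- num_frees += 1; recurse on room[:-(1+len(period))] with add_free=True; return its triple
    has_free_go (PySem.List.slice room none (some (-(1 + (period.length : Int))))) period true (num_frees + 1)
  else
    -- try: int(room[1]); if len(room) > 4: room = room[:4]; add_free = True; num_frees += 1
    -- except: pass   (both IndexError and ValueError are swallowed)
    match PySem.List.pyGet? room 1 with
    | none => (room, add_free, num_frees)
    | some c =>
      match PySem.Int.ofChars? [c] with
      | none => (room, add_free, num_frees)
      | some _ =>
        if (room.length : Int) > 4 then
          (PySem.List.slice room none (some 4), true, num_frees + 1)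
        else (room, add_free, num_frees)
termination_by room.length
decreasing_by
  exact pvSliceLen_lt room period.length (by
    intro hnil; rw [hnil] at h; revert h; decide)

def has_free (room : String) (period : String) (add_free : Bool) (num_frees : Int) :
    String × Bool × Int :=
  let r := has_free_go room.toList period.toList add_free num_frees
  (String.ofList r.1, r.2.1, r.2.2)

-- ===== PORT B =====
-- the while-loop: while " " in room: num_frees += 1; add_free = True; room = room[:-step]
-- (step = 1 + len(period) is passed as the period length plen, so step = 1 + plen)
def stripFrees (room : List Char) (plen : Nat) (add_free : Bool) (num_frees : Int) :
    List Char × Bool × Int :=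
  if h : PySem.Chars.isIn [' '] room then
    stripFrees (PySem.List.slice room none (some (-(1 + (plen : Int))))) plen true (num_frees + 1)
  else (room, add_free, num_frees)
termination_by room.length
decreasing_by
  exact pvSliceLen_lt room plen (by
    intro hnil; rw [hnil] at h; revert h; decide)

def has_free_alt (room : String) (period : String) (add_free : Bool) (num_frees : Int) :
    String × Bool × Int :=
  let s := stripFrees room.toList period.toList.length add_free num_frees
  -- if len(room) > 4 and room[1].isdigit(): room = room[:4]; add_free = True; num_frees += 1
  if 4 < s.1.length && PySem.Chars.isdigit (s.1.getD 1 ' ') then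
    (String.ofList (s.1.take 4), true, s.2.2 + 1)
  else (String.ofList s.1, s.2.1, s.2.2)

-- ===== PRECONDITION & SPEC =====
def Spec_has_free (room : String) (period : String) (add_free : Bool) (num_frees : Int) (out : String × Bool × Int) : Prop := out = has_free_alt room period add_free num_frees
instance (room : String) (period : String) (add_free : Bool) (num_frees : Int) (out : String × Bool × Int) : Decidable (Spec_has_free room period add_free num_frees out) := by unfold Spec_has_free; infer_instance

-- ===== CLAIM (what is proved, stated in full; the proofs are below) =====
def Claim_equal_has_free : Prop := ∀ (room : String) (period : String) (add_free : Bool) (num_frees : Int), Dom_has_free room period add_free num_frees → Spec_has_free room period add_free num_frees (has_free room period add_free num_frees)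

-- ===== LEMMAS AND PROOFS =====

-- on a domain (ASCII) char, int(c) succeeds exactly when c is a decimal digit
theorem pvOfChars_single_isSome (c : Char) (h : pvDomChar c = true) :
    (PySem.Int.ofChars? [c]).isSome = PySem.Chars.isdigit c := by
  have hn : c.toNat < 127 := by
    simp [pvDomChar] at h; omega
  have hmem : c.toNat ∈ List.range 127 := List.mem_range.mpr hn
  have hall : ∀ n ∈ List.range 127,
      (PySem.Int.ofChars? [Char.ofNat n]).isSome = PySem.Chars.isdigit (Char.ofNat n) := by
    set_option maxRecDepth 8192 in decide
  have := hall c.toNat hmem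
  rwa [Char.ofNat_toNat] at this

theorem pvSlice_four {α : Type} (xs : List α) :
    PySem.List.slice xs none (some 4) = xs.take 4 := by
  simp [PySem.List.slice, PySem.List.clampIdx]

theorem pvAllSlice (room : List Char) (a b : Option Int)
    (h : room.all pvDomChar = true) :
    (PySem.List.slice room a b).all pvDomChar = true := by
  simp only [List.all_eq_true] at h ⊢
  intro x hx
  simp only [PySem.List.slice] at hx
  exact h x (List.mem_of_mem_drop (List.mem_of_mem_take hx))

theorem pv_pyGet1 (room : List Char) (c : Char) (h : PySem.List.pyGet? room 1 = some c) :
    room[1]? = some c ∧ room.getD 1 ' ' = c := by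
  have h1 : room[1]? = some c := by
    by_cases hl : 1 < room.length
    · simpa [PySem.List.pyGet?, PySem.List.pyIdx?, hl] using h
    · simp [PySem.List.pyGet?, PySem.List.pyIdx?, hl] at h
  exact ⟨h1, by simp [List.getD_eq_getElem?_getD, h1]⟩

theorem pvAllMem (room : List Char) (c : Char) (h : room.all pvDomChar = true)
    (hc : c ∈ room) : pvDomChar c = true :=
  (List.all_eq_true.mp h) c hc

theorem pv_go_eq (room period : List Char) (add_free : Bool) (num_frees : Int)
    (h : room.all pvDomChar = true) :
    has_free_go room period add_free num_frees =
      (let s := stripFrees room period.length add_free num_frees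
       if 4 < s.1.length && PySem.Chars.isdigit (s.1.getD 1 ' ') then
         (s.1.take 4, true, s.2.2 + 1)
       else (s.1, s.2.1, s.2.2)) := by
  revert h
  fun_induction has_free_go room period add_free num_frees with
  | case1 room af nf hin ih =>
    intro h
    rw [stripFrees]
    simp only [hin, reduceDIte]
    exact ih (pvAllSlice room _ _ h)
  | case2 room af nf hnin hget =>
    intro h
    rw [stripFrees]
    simp only [Bool.not_eq_true] at hnin
    simp only [hnin, Bool.false_eq_true, reduceDIte]
    have hlen : room.length ≤ 1 := by
      by_cases hl : 1 < room.length
      · exfalso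
        simp [PySem.List.pyGet?, PySem.List.pyIdx?, hl] at hget
      · omega
    have hc : decide (4 < room.length) = false := by
      simp only [decide_eq_false_iff_not]; omega
    rw [hc]
    simp
  | case3 room af nf hnin c hget hnone =>
    intro h
    rw [stripFrees]
    simp only [Bool.not_eq_true] at hnin
    simp only [hnin, Bool.false_eq_true, reduceDIte]
    have hc := pv_pyGet1 room c hget
    have hdig : PySem.Chars.isdigit c = false := by
      have := pvOfChars_single_isSome c (pvAllMem room c h (List.mem_of_getElem? hc.1))
      rw [hnone] at this
      simpa using this.symm
    simp only [hc.2, hdig, Bool.and_false, Bool.false_eq_true, if_false]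
  | case4 room af nf hnin c hget v hsome hgt =>
    intro h
    rw [stripFrees]
    simp only [Bool.not_eq_true] at hnin
    simp only [hnin, Bool.false_eq_true, reduceDIte]
    have hc := pv_pyGet1 room c hget
    have hdig : PySem.Chars.isdigit c = true := by
      have := pvOfChars_single_isSome c (pvAllMem room c h (List.mem_of_getElem? hc.1))
      rw [hsome] at this
      simpa using this.symm
    have hlen : decide (4 < room.length) = true := by
      simp only [decide_eq_true_eq]; exact_mod_cast hgt
    simp only [hc.2, hdig, hlen, Bool.and_true, if_true, pvSlice_four]
  | case5 room af nf hnin c hget v hsome hngt =>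
    intro h
    rw [stripFrees]
    simp only [Bool.not_eq_true] at hnin
    simp only [hnin, Bool.false_eq_true, reduceDIte]
    have hlen : decide (4 < room.length) = false := by
      simp only [decide_eq_false_iff_not]; omega
    rw [hlen]
    simp

-- ===== VERDICT (by name: the statement is the Claim_ definition above) =====
theorem has_free_spec : Claim_equal_has_free := by
  intro room period add_free num_frees hdom
  unfold Spec_has_free has_free has_free_alt
  have h : room.toList.all pvDomChar = true := by
    simp only [Dom_has_free, pvDomStr, Bool.and_eq_true] at hdom
    exact hdom.1.1
  rw [pv_go_eq room.toList period.toList add_free num_frees h]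
  simp only []
  split <;> rfl
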